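-- pv_equiv track=rewrite | github.com/Byongho96/algorithm_practice | Baekjoon/22866_탑_보기.py | solution
-- ===== SOURCE A (Python) =====
-- from typing import List
--
-- def solution(N: int, arr: List[int]) -> List[str]:
--     cnt = [0] * N
--     closest = [N] * N
--
--     # from left to right
--     stack = [[0, 0] for _ in range(N)]
--     ptr = -1
--     for idx in range(N):
--         height = arr[idx]
--         while ptr > -1 and stack[ptr][0] < height + 1:
--             ptr -= 1
--
--         if ptr > -1:
--             closest[idx] = stack[ptr][1]
--
--         ptr += 1
--         stack[ptr][0] = height
--         stack[ptr][1] = idx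
--         cnt[idx] += ptr
--
--     # from right to left
--     ptr = -1
--     for idx in range(N - 1, -1, -1):
--         height = arr[idx]
--         while ptr > -1 and stack[ptr][0] < height + 1:
--             ptr -= 1
--
--         if ptr > -1 and abs(idx - closest[idx]) > stack[ptr][1] - idx:
--             closest[idx] = stack[ptr][1]
--
--         ptr += 1
--         stack[ptr][0] = height
--         stack[ptr][1] = idx
--         cnt[idx] += ptr
--
--     # make answer
--     answer = []
--     for i in range(N):
--         if cnt[i] == 0:
--             answer.append(f'0')
--         else:
--             answer.append(f'{cnt[i]} {closest[i] + 1}')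
--     return answer
-- ===== SOURCE B (Python) =====
-- from typing import List
--
-- def solution(N: int, arr: List[int]) -> List[str]:
--     out = []
--     for i in range(N):
--         h = arr[i]
--         # scan leftward with a running max: count visible taller towers, note the nearest
--         lc, lnear, m = 0, -1, h
--         for j in reversed(range(i)):
--             if arr[j] > m:
--                 lc += 1
--                 if lnear < 0:
--                     lnear = j
--                 m = arr[j]
--         # symmetric rightward scan
--         rc, rnear, m = 0, -1, h
--         for j in range(i + 1, N):
--             if arr[j] > m:
--                 rc += 1
--                 if rnear < 0:
--                     rnear = j
--                 m = arr[j]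
--         c = lc + rc
--         if c == 0:
--             out.append('0')
--         else:
--             if lnear >= 0 and (rnear < 0 or i - lnear <= rnear - i):
--                 near = lnear
--             else:
--                 near = rnear
--             out.append(f'{c} {near + 1}')
--     return out
-- ===== Notes on version B (the rewrite author's own statement) =====
-- stated objective: simpler
-- what changed: Replaced A's two shared monotonic-stack passes (preallocated stack array with a pointer, pop-while, per-pass closest patching) by independent per-tower running-max scans to the left and to the right that directly count visible taller towers and record the nearest taller index, with the left-preferred tie-break written out explicitly.
import Mathlib
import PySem

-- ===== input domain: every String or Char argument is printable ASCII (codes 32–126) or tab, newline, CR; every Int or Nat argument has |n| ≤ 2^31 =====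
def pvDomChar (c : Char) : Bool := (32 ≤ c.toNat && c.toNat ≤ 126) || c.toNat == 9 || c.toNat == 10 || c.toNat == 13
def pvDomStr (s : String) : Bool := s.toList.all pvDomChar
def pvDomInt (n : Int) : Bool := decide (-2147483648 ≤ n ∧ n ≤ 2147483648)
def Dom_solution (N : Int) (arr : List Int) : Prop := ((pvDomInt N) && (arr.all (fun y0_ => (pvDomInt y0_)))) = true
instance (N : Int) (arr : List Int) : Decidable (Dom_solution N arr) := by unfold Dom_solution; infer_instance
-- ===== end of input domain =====

-- B replaces A's monotonic-stack passes by independent per-tower running-max scans (simpler, direct);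
-- objective: simpler, not speed (B is quadratic, A is linear).


-- ===== PORT A =====
-- the inner 'while ptr > -1 and stack[ptr][0] < height + 1: ptr -= 1' loop
def popLoop (stack : List (Int × Int)) (height : Int) (ptr : Int) : Int :=
  if hcond : ptr > -1 ∧ (stack.getD ptr.toNat (0, 0)).1 < height + 1 then
    popLoop stack height (ptr - 1)
  else ptr
termination_by (ptr + 1).toNat
decreasing_by have := hcond.1; omega

-- one iteration of A's left-to-right pass; state = (cnt, closest, stack, ptr)
def stepL (arr : List Int) (st : List Int × List Int × List (Int × Int) × Int) (idx : Int) :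
    List Int × List Int × List (Int × Int) × Int :=
  match st with
  | (cnt, closest, stack, ptr0) =>
    let height := arr.getD idx.toNat 0
    let ptr1 := popLoop stack height ptr0
    let closest' := if ptr1 > -1 then closest.set idx.toNat (stack.getD ptr1.toNat (0, 0)).2 else closest
    let ptr2 := ptr1 + 1
    let stack' := stack.set ptr2.toNat (height, idx)
    let cnt' := cnt.set idx.toNat (cnt.getD idx.toNat 0 + ptr2)
    (cnt', closest', stack', ptr2)

-- one iteration of A's right-to-left pass
def stepR (arr : List Int) (st : List Int × List Int × List (Int × Int) × Int) (idx : Int) :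
    List Int × List Int × List (Int × Int) × Int :=
  match st with
  | (cnt, closest, stack, ptr0) =>
    let height := arr.getD idx.toNat 0
    let ptr1 := popLoop stack height ptr0
    let closest' :=
      if ptr1 > -1 ∧ |idx - closest.getD idx.toNat 0| > (stack.getD ptr1.toNat (0, 0)).2 - idx then
        closest.set idx.toNat (stack.getD ptr1.toNat (0, 0)).2
      else closest
    let ptr2 := ptr1 + 1
    let stack' := stack.set ptr2.toNat (height, idx)
    let cnt' := cnt.set idx.toNat (cnt.getD idx.toNat 0 + ptr2)
    (cnt', closest', stack', ptr2)

def solution (N : Int) (arr : List Int) : List String :=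
  let cnt0 : List Int := List.replicate N.toNat 0
  let closest0 : List Int := List.replicate N.toNat N
  let stack0 : List (Int × Int) := List.replicate N.toNat (0, 0)
  match (PySem.List.pyRange 0 N 1).foldl (stepL arr) (cnt0, closest0, stack0, -1) with
  | (cnt1, closest1, stack1, _) =>
    match (PySem.List.pyRange (N - 1) (-1) (-1)).foldl (stepR arr) (cnt1, closest1, stack1, -1) with
    | (cnt2, closest2, _, _) =>
      (PySem.List.pyRange 0 N 1).foldl (fun answer i =>
        answer ++ [if cnt2.getD i.toNat 0 = 0 then "0"
                   else PySem.Int.toStr (cnt2.getD i.toNat 0) ++ " " ++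
                        PySem.Int.toStr (closest2.getD i.toNat 0 + 1)]) []

-- ===== PORT B =====
-- B's inner running-max scan body: state (count, nearest-or--1, running max), visited index j
def scanB (arr : List Int) (s : Int × Int × Int) (j : Int) : Int × Int × Int :=
  if arr.getD j.toNat 0 > s.2.2 then
    (s.1 + 1, if s.2.1 < 0 then j else s.2.1, arr.getD j.toNat 0)
  else s

def solution_alt (N : Int) (arr : List Int) : List String :=
  (PySem.List.pyRange 0 N 1).foldl (fun out i =>
    let h := arr.getD i.toNat 0
    let l := ((PySem.List.pyRange 0 i 1).reverse).foldl (scanB arr) (0, -1, h)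
    let r := (PySem.List.pyRange (i + 1) N 1).foldl (scanB arr) (0, -1, h)
    let c := l.1 + r.1
    out ++ [if c = 0 then "0"
            else
              let near := if l.2.1 ≥ 0 ∧ (r.2.1 < 0 ∨ i - l.2.1 ≤ r.2.1 - i) then l.2.1 else r.2.1
              PySem.Int.toStr c ++ " " ++ PySem.Int.toStr (near + 1)]) []

-- ===== PRECONDITION & SPEC =====
-- Pre excludes exactly the inputs where A raises IndexError (arr shorter than N).
def Pre_solution (N : Int) (arr : List Int) : Prop := N ≤ (arr.length : Int)
instance (N : Int) (arr : List Int) : Decidable (Pre_solution N arr) := by unfold Pre_solution; infer_instance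
def pvWitness_solution : Int × List Int := (3, [2, 1, 3])

def Spec_solution (N : Int) (arr : List Int) (out : List String) : Prop := out = solution_alt N arr
instance (N : Int) (arr : List Int) (out : List String) : Decidable (Spec_solution N arr out) := by unfold Spec_solution; infer_instance

-- ===== CLAIM (what is proved, stated in full; the proofs are below) =====
def Claim_equal_solution : Prop := ∀ (N : Int) (arr : List Int), Dom_solution N arr → Pre_solution N arr → Spec_solution N arr (solution N arr)

-- ===== LEMMAS AND PROOFS =====

-- height of tower j (both ports read arr with getD default 0)
def hgt (arr : List Int) (j : Nat) : Int := arr.getD j 0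

-- monotonic-stack "staircase", kept TOP-FIRST: push drops all entries not taller than p, then puts p on top
def push (s : List (Int × Int)) (p : Int × Int) : List (Int × Int) :=
  p :: s.dropWhile (fun q => decide (q.1 ≤ p.1))

def stair (P : List (Int × Int)) : List (Int × Int) := P.foldl push []

-- the part of the staircase strictly taller than h
def dW (h : Int) (s : List (Int × Int)) : List (Int × Int) :=
  s.dropWhile (fun q => decide (q.1 ≤ h))

-- towers a..b-1 as (height, index) pairs, left to right
def pairsL (arr : List Int) (k : Nat) : List (Int × Int) :=
  (List.range k).map (fun j => (hgt arr j, (j : Int)))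

def pairsR (arr : List Int) (k n : Nat) : List (Int × Int) :=
  (List.range' k (n - k)).map (fun j => (hgt arr j, (j : Int)))

-- per-tower characteristic data
def DLs (arr : List Int) (i : Nat) : List (Int × Int) := dW (hgt arr i) (stair (pairsL arr i))
def DRs (arr : List Int) (n i : Nat) : List (Int × Int) :=
  dW (hgt arr i) (stair ((pairsR arr (i + 1) n).reverse))

def lcnt (arr : List Int) (i : Nat) : Int := ((DLs arr i).length : Int)
def lclose (arr : List Int) (N : Int) (i : Nat) : Int :=
  match DLs arr i with | [] => N | q :: _ => q.2
def rcnt (arr : List Int) (n i : Nat) : Int := ((DRs arr n i).length : Int)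
def fclose (arr : List Int) (N : Int) (n i : Nat) : Int :=
  match DRs arr n i with
  | [] => lclose arr N i
  | q :: _ => if |(i : Int) - lclose arr N i| > q.2 - (i : Int) then q.2 else lclose arr N i

-- abstract form of B's scan step, over (height, index) pairs
def scanF (s : Int × Int × Int) (p : Int × Int) : Int × Int × Int :=
  if p.1 > s.2.2 then (s.1 + 1, if s.2.1 < 0 then p.2 else s.2.1, p.1) else s

lemma dW_dW (h1 h2 : Int) (hle : h1 ≤ h2) (s : List (Int × Int)) :
    dW h2 (dW h1 s) = dW h2 s := by
  induction s with
  | nil => rfl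
  | cons q s ih =>
    by_cases hq : q.1 ≤ h1
    · have hq2 : q.1 ≤ h2 := le_trans hq hle
      simp only [dW, List.dropWhile_cons, hq, hq2, decide_true] at ih ⊢
      exact ih
    · simp [dW, List.dropWhile_cons, hq]

lemma stair_concat (P : List (Int × Int)) (p : Int × Int) :
    stair (P ++ [p]) = p :: dW p.1 (stair P) := by
  simp [stair, List.foldl_append, push, dW]

lemma stair_subset (P : List (Int × Int)) (q : Int × Int) (h : q ∈ stair P) : q ∈ P := by
  induction P using List.reverseRecOn with
  | nil => simp [stair] at h
  | append_singleton P p ih =>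
    rw [stair_concat, List.mem_cons] at h
    rcases h with h | h
    · simp [h]
    · have : q ∈ stair P := (List.dropWhile_sublist _).subset h
      exact List.mem_append_left _ (ih this)

lemma stair_length_le (P : List (Int × Int)) : (stair P).length ≤ P.length := by
  induction P using List.reverseRecOn with
  | nil => simp [stair]
  | append_singleton P p ih =>
    rw [stair_concat]
    have := List.length_dropWhile_le (fun q => decide (q.1 ≤ p.1)) (stair P)
    simp only [List.length_cons, List.length_append, dW]
    omega

lemma getLastD_fst_congr (X : List (Int × Int)) (a b : Int × Int) (h : a.1 = b.1) :
    (X.getLastD a).1 = (X.getLastD b).1 := by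
  cases X with
  | nil => exact h
  | cons x xs =>
    cases hx : (x :: xs).getLast? with
    | none => simp at hx
    | some y => simp [List.getLastD, hx]

lemma scan_spec (P : List (Int × Int)) (hP : ∀ q ∈ P, 0 ≤ q.2) :
    ∀ (c near m : Int),
    P.reverse.foldl scanF (c, near, m) =
      (c + ((dW m (stair P)).length : Int),
       if near < 0 then ((dW m (stair P)).headD (0, near)).2 else near,
       ((dW m (stair P)).getLastD (m, 0)).1) := by
  induction P using List.reverseRecOn with
  | nil => intro c near m; simp [stair, dW]
  | append_singleton P p ih =>
    intro c near m
    have hP' : ∀ q ∈ P, 0 ≤ q.2 := fun q hq => hP q (List.mem_append_left _ hq)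
    have hp2 : 0 ≤ p.2 := hP p (by simp)
    rw [List.reverse_append]
    simp only [List.reverse_singleton, List.singleton_append, List.foldl_cons]
    rw [stair_concat]
    by_cases hp : p.1 > m
    · have h1 : scanF (c, near, m) p = (c + 1, if near < 0 then p.2 else near, p.1) := by
        simp [scanF, hp]
      rw [h1, ih hP']
      have hnear : ¬ ((if near < 0 then p.2 else near) < 0) := by split_ifs with h <;> omega
      have hd : dW m (p :: dW p.1 (stair P)) = p :: dW p.1 (stair P) := by
        simp [dW, List.dropWhile_cons, not_le.mpr hp]
      rw [hd]
      refine Prod.ext ?_ (Prod.ext ?_ ?_)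
      · simp only [List.length_cons]
        push_cast
        ring
      · rw [if_neg hnear]
        rcases lt_or_ge near 0 with h | h
        · simp [h]
        · simp [not_lt.mpr h]
      · simp only [List.getLastD_cons]
        exact getLastD_fst_congr _ _ _ rfl
    · have h1 : scanF (c, near, m) p = (c, near, m) := by simp [scanF, hp]
      have hple : p.1 ≤ m := not_lt.mp hp
      have hd : dW m (p :: dW p.1 (stair P)) = dW m (stair P) := by
        rw [show dW m (p :: dW p.1 (stair P)) = dW m (dW p.1 (stair P)) from by
              simp [dW, List.dropWhile_cons, hple],
            dW_dW p.1 m hple]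
      rw [h1, ih hP', hd]

-- A's stack representation: the live part of the preallocated array, read top-first, is S
def SRep (n : Nat) (stack : List (Int × Int)) (S : List (Int × Int)) : Prop :=
  stack.length = n ∧ S.length ≤ n ∧ (stack.take S.length).reverse = S

lemma rep_getD_head {n : Nat} {stack : List (Int × Int)} {q : Int × Int} {T : List (Int × Int)}
    (hrep : SRep n stack (q :: T)) : stack.getD T.length (0, 0) = q := by
  obtain ⟨hlen, hle, htake⟩ := hrep
  simp only [List.length_cons] at hle
  have hTlt : T.length < stack.length := by omega
  have htake' : stack.take (T.length + 1) = T.reverse ++ [q] := by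
    have := congrArg List.reverse htake
    simpa using this
  rw [List.getD_eq_getElem stack (0, 0) hTlt]
  have h2 : (stack.take (T.length + 1))[T.length]'(by simp; omega) = stack[T.length] :=
    List.getElem_take
  rw [← h2]
  simp [htake']

lemma rep_suffix {n : Nat} {stack : List (Int × Int)} {q : Int × Int} {T : List (Int × Int)}
    (hrep : SRep n stack (q :: T)) : SRep n stack T := by
  obtain ⟨hlen, hle, htake⟩ := hrep
  simp only [List.length_cons] at hle
  have htake' : stack.take (T.length + 1) = T.reverse ++ [q] := by
    have := congrArg List.reverse htake
    simpa using this
  refine ⟨hlen, by omega, ?_⟩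
  have : stack.take T.length = (stack.take (T.length + 1)).take T.length := by
    rw [List.take_take]
    congr 1
    omega
  rw [this, htake']
  have : (T.reverse ++ [q]).take T.length = T.reverse := by
    have := List.take_length_add_append (l₁ := T.reverse) (l₂ := [q]) 0
    simpa using this
  rw [this]
  simp

lemma popLoop_spec {n : Nat} (h : Int) : ∀ (S stack : List (Int × Int)), SRep n stack S →
    popLoop stack h ((S.length : Int) - 1) = (((dW h S).length : Int) - 1) ∧ SRep n stack (dW h S) := by
  intro S
  induction S with
  | nil =>
    intro stack hrep
    rw [popLoop]
    simp [dW, hrep]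
  | cons q T ih =>
    intro stack hrep
    have hhead := rep_getD_head hrep
    have hTcast : (((q :: T).length : Int) - 1) = (T.length : Int) := by simp
    rw [hTcast, popLoop]
    by_cases hq : q.1 < h + 1
    · rw [dif_pos ⟨by omega, by rw [show ((T.length : Int)).toNat = T.length by omega, hhead]; exact hq⟩]
      have hdw : dW h (q :: T) = dW h T := by
        simp [dW, List.dropWhile_cons, show q.1 ≤ h by omega]
      rw [hdw]
      exact ih stack (rep_suffix hrep)
    · rw [dif_neg (by
        rintro ⟨-, hc⟩
        rw [show ((T.length : Int)).toNat = T.length by omega, hhead] at hc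
        exact hq hc)]
      have hdw : dW h (q :: T) = q :: T := by
        simp [dW, List.dropWhile_cons, show ¬ (q.1 ≤ h) by omega]
      rw [hdw]
      exact ⟨by simp, hrep⟩

lemma rep_push {n : Nat} {stack S : List (Int × Int)} (hrep : SRep n stack S)
    (hlt : S.length < n) (p : Int × Int) : SRep n (stack.set S.length p) (p :: S) := by
  obtain ⟨hlen, hle, htake⟩ := hrep
  have hSlt : S.length < stack.length := by omega
  refine ⟨by simp [hlen], by simp; omega, ?_⟩
  rw [List.set_eq_take_cons_drop p hSlt]
  have h1 : (stack.take S.length ++ p :: stack.drop (S.length + 1)).take (p :: S).length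
      = stack.take S.length ++ [p] := by
    have hl : (stack.take S.length).length = S.length := by simp; omega
    have := List.take_length_add_append (l₁ := stack.take S.length)
        (l₂ := p :: stack.drop (S.length + 1)) 1
    simp only [List.length_cons, hl] at this ⊢
    rw [this]
    simp
  rw [h1]
  simp [htake]

lemma map_range_set {α : Type} (n k : Nat) (f : Nat → α) (v : α) :
    ((List.range n).map f).set k v = (List.range n).map (fun i => if i = k then v else f i) := by
  apply List.ext_getElem
  · simp
  · intro i h1 h2
    simp only [List.getElem_set, List.getElem_map, List.getElem_range]
    simp only [List.length_set, List.length_map, List.length_range] at h1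
    rcases eq_or_ne i k with hik | hik
    · simp [hik]
    · simp [hik, Ne.symm hik]

lemma map_range_congr {α : Type} (n : Nat) (f g : Nat → α) (h : ∀ i < n, f i = g i) :
    (List.range n).map f = (List.range n).map g := by
  apply List.map_congr_left
  intro i hi
  exact h i (List.mem_range.mp hi)

lemma stepL_eval (arr : List Int) (cnt closest : List Int) (stack : List (Int × Int))
    (ptr0 idx : Int) :
    stepL arr (cnt, closest, stack, ptr0) idx =
      (cnt.set idx.toNat (cnt.getD idx.toNat 0 + (popLoop stack (arr.getD idx.toNat 0) ptr0 + 1)),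
       (if popLoop stack (arr.getD idx.toNat 0) ptr0 > -1 then
          closest.set idx.toNat
            (stack.getD (popLoop stack (arr.getD idx.toNat 0) ptr0).toNat (0, 0)).2
        else closest),
       stack.set ((popLoop stack (arr.getD idx.toNat 0) ptr0) + 1).toNat (arr.getD idx.toNat 0, idx),
       popLoop stack (arr.getD idx.toNat 0) ptr0 + 1) := rfl

lemma stepR_eval (arr : List Int) (cnt closest : List Int) (stack : List (Int × Int))
    (ptr0 idx : Int) :
    stepR arr (cnt, closest, stack, ptr0) idx =
      (cnt.set idx.toNat (cnt.getD idx.toNat 0 + (popLoop stack (arr.getD idx.toNat 0) ptr0 + 1)),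
       (if popLoop stack (arr.getD idx.toNat 0) ptr0 > -1 ∧
           |idx - closest.getD idx.toNat 0| >
             (stack.getD (popLoop stack (arr.getD idx.toNat 0) ptr0).toNat (0, 0)).2 - idx then
          closest.set idx.toNat
            (stack.getD (popLoop stack (arr.getD idx.toNat 0) ptr0).toNat (0, 0)).2
        else closest),
       stack.set ((popLoop stack (arr.getD idx.toNat 0) ptr0) + 1).toNat (arr.getD idx.toNat 0, idx),
       popLoop stack (arr.getD idx.toNat 0) ptr0 + 1) := rfl

lemma pairsL_succ (arr : List Int) (k : Nat) :
    pairsL arr (k + 1) = pairsL arr k ++ [(hgt arr k, (k : Int))] := by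
  simp [pairsL, List.range_succ]

lemma DLs_lt_of_mem (arr : List Int) (i : Nat) (q : Int × Int) (hq : q ∈ DLs arr i) :
    0 ≤ q.2 ∧ q.2 < (i : Int) := by
  have h1 : q ∈ stair (pairsL arr i) := (List.dropWhile_sublist _).subset hq
  have h2 := stair_subset _ _ h1
  simp only [pairsL, List.mem_map, List.mem_range] at h2
  obtain ⟨j, hj, rfl⟩ := h2
  constructor <;> simp <;> omega

lemma DRs_lt_of_mem (arr : List Int) (n i : Nat) (q : Int × Int) (hq : q ∈ DRs arr n i) :
    (i : Int) < q.2 ∧ q.2 < (n : Int) := by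
  have h1 : q ∈ stair ((pairsR arr (i + 1) n).reverse) := (List.dropWhile_sublist _).subset hq
  have h2 := stair_subset _ _ h1
  rw [List.mem_reverse] at h2
  simp only [pairsR, List.mem_map, List.mem_range'_1] at h2
  obtain ⟨j, hj, rfl⟩ := h2
  constructor <;> simp <;> omega

lemma leftPass (arr : List Int) (n : Nat) (N : Int) (hN : N = (n : Int)) :
    ∀ k, k ≤ n → ∃ stk,
    (PySem.List.pyRange 0 (k : Int) 1).foldl (stepL arr)
        (List.replicate n 0, List.replicate n N, List.replicate n ((0 : Int), (0 : Int)), -1)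
      = ((List.range n).map (fun i => if i < k then lcnt arr i else 0),
         (List.range n).map (fun i => if i < k then lclose arr N i else N),
         stk, ((stair (pairsL arr k)).length : Int) - 1)
    ∧ SRep n stk (stair (pairsL arr k)) := by
  intro k
  induction k with
  | zero =>
    intro _
    have h0 : stair (pairsL arr 0) = [] := by simp [stair, pairsL]
    refine ⟨List.replicate n ((0 : Int), (0 : Int)), ?_, ⟨by simp, by simp [h0], by simp [h0]⟩⟩
    rw [show ((0 : Nat) : Int) = 0 by simp, PySem.List.pyRange_one_eq_nil (le_refl 0)]
    simp only [List.foldl_nil, stair, pairsL, List.range_zero, List.map_nil, List.foldl_nil,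
      List.length_nil]
    refine Prod.ext ?_ (Prod.ext ?_ rfl)
    · simp [List.map_const']
    · simp [List.map_const']
  | succ k ih =>
    intro hk1
    have hk : k < n := hk1
    obtain ⟨stk, heq, hrep⟩ := ih (Nat.le_of_lt hk1)
    rw [show (((k + 1 : Nat)) : Int) = ((k : Nat) : Int) + 1 by push_cast; ring,
      PySem.List.pyRange_one_succ_right (by positivity), List.foldl_append]
    rw [heq]
    simp only [List.foldl_cons, List.foldl_nil]
    rw [stepL_eval]
    have hA : arr.getD ((k : Int)).toNat 0 = hgt arr k := by simp [hgt]
    rw [hA]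
    have hpop := popLoop_spec (n := n) (hgt arr k) (stair (pairsL arr k)) stk hrep
    have hDL : dW (hgt arr k) (stair (pairsL arr k)) = DLs arr k := rfl
    rw [hDL] at hpop
    obtain ⟨hptr, hrep2⟩ := hpop
    rw [hptr]
    have hDn : (DLs arr k).length < n := by
      have h1 := List.length_dropWhile_le (fun q => decide (q.1 ≤ hgt arr k)) (stair (pairsL arr k))
      have h2 := stair_length_le (pairsL arr k)
      have h3 : (pairsL arr k).length = k := by simp [pairsL]
      simp only [DLs, dW] at *
      omega
    have hstair1 : stair (pairsL arr (k + 1)) = (hgt arr k, (k : Int)) :: DLs arr k := by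
      rw [pairsL_succ, stair_concat]; rfl
    have htoNat : (((DLs arr k).length : Int) - 1 + 1).toNat = (DLs arr k).length := by omega
    refine ⟨stk.set (DLs arr k).length (hgt arr k, (k : Int)), ?_, ?_⟩
    · refine Prod.ext ?_ (Prod.ext ?_ (Prod.ext ?_ ?_))
      · -- cnt component
        simp only [Int.toNat_natCast]
        rw [PySem.List.getD_map_range _ _ _ _ hk, if_neg (lt_irrefl k), map_range_set]
        apply map_range_congr
        intro i hi
        rcases eq_or_ne i k with rfl | hne
        · simp [lcnt]
        · simp only [hne, if_false]
          by_cases hik : i < k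
          · simp [hik, Nat.lt_succ_of_lt hik]
          · have : ¬ i < k + 1 := by omega
            simp [hik, this]
      · -- closest component
        simp only [Int.toNat_natCast]
        rcases hDLe : DLs arr k with _ | ⟨q, T⟩
        · rw [if_neg (by simp)]
          apply map_range_congr
          intro i hi
          rcases eq_or_ne i k with rfl | hne
          · simp [lclose, hDLe]
          · by_cases hik : i < k
            · simp [hik, Nat.lt_succ_of_lt hik]
            · have : ¬ i < k + 1 := by omega
              simp [hik, this]
        · rw [if_pos (by simp only [List.length_cons]; push_cast; omega)]
          have hget : stk.getD ((((q :: T).length : Int) - 1)).toNat (0, 0) = q := by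
            rw [show (((q :: T).length : Int) - 1).toNat = T.length by simp]
            exact rep_getD_head (hDLe ▸ hrep2)
          rw [hget, map_range_set]
          apply map_range_congr
          intro i hi
          rcases eq_or_ne i k with rfl | hne
          · simp [lclose, hDLe]
          · simp only [hne, if_false]
            by_cases hik : i < k
            · simp [hik, Nat.lt_succ_of_lt hik]
            · have : ¬ i < k + 1 := by omega
              simp [hik, this]
      · -- stack component
        rw [htoNat]
      · -- ptr component
        rw [hstair1]
        simp only [List.length_cons]
        push_cast
        ring
    · rw [hstair1, ← htoNat]
      rw [htoNat]
      exact rep_push hrep2 hDn _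

lemma pairsR_cons (arr : List Int) (k n : Nat) (hk : k < n) :
    pairsR arr k n = (hgt arr k, (k : Int)) :: pairsR arr (k + 1) n := by
  simp only [pairsR]
  rw [show n - k = (n - (k + 1)) + 1 by omega, List.range'_succ]
  simp

lemma rightPass (arr : List Int) (n : Nat) (N : Int) (hN : N = (n : Int))
    (stk0 : List (Int × Int)) (h0 : stk0.length = n) :
    ∀ d k, k + d = n → ∃ stk,
    ((PySem.List.pyRange (k : Int) N 1).reverse).foldl (stepR arr)
        ((List.range n).map (fun i => lcnt arr i),
         (List.range n).map (fun i => lclose arr N i), stk0, -1)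
      = ((List.range n).map (fun i => lcnt arr i + if k ≤ i then rcnt arr n i else 0),
         (List.range n).map (fun i => if k ≤ i then fclose arr N n i else lclose arr N i),
         stk, ((stair ((pairsR arr k n).reverse)).length : Int) - 1)
    ∧ SRep n stk (stair ((pairsR arr k n).reverse)) := by
  intro d
  induction d with
  | zero =>
    intro k hkd
    have hkn : k = n := by omega
    subst hkn
    have hst0 : stair ((pairsR arr k k).reverse) = [] := by simp [stair, pairsR]
    refine ⟨stk0, ?_, ⟨h0, by simp [hst0], by simp [hst0]⟩⟩
    rw [hN, PySem.List.pyRange_one_eq_nil (le_refl _)]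
    simp only [List.reverse_nil, List.foldl_nil, hst0, List.length_nil]
    refine Prod.ext ?_ (Prod.ext ?_ rfl)
    · apply map_range_congr
      intro i hi
      simp [show ¬ (k ≤ i) by omega]
    · apply map_range_congr
      intro i hi
      simp [show ¬ (k ≤ i) by omega]
  | succ d ihd =>
    intro k hkd
    have hk : k < n := by omega
    obtain ⟨stk, heq, hrep⟩ := ihd (k + 1) (by omega)
    rw [show (((k + 1 : Nat)) : Int) = ((k : Nat) : Int) + 1 by push_cast; ring] at heq
    rw [PySem.List.pyRange_one_cons (by omega : (k : Int) < N), List.reverse_cons,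
      List.foldl_append, heq]
    simp only [List.foldl_cons, List.foldl_nil]
    rw [stepR_eval]
    have hA : arr.getD ((k : Int)).toNat 0 = hgt arr k := by simp [hgt]
    rw [hA]
    have hpop := popLoop_spec (n := n) (hgt arr k)
        (stair ((pairsR arr (k + 1) n).reverse)) stk hrep
    have hDR : dW (hgt arr k) (stair ((pairsR arr (k + 1) n).reverse)) = DRs arr n k := rfl
    rw [hDR] at hpop
    obtain ⟨hptr, hrep2⟩ := hpop
    rw [hptr]
    have hDn : (DRs arr n k).length < n := by
      have h1 := List.length_dropWhile_le (fun q => decide (q.1 ≤ hgt arr k))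
          (stair ((pairsR arr (k + 1) n).reverse))
      have h2 := stair_length_le ((pairsR arr (k + 1) n).reverse)
      have h3 : ((pairsR arr (k + 1) n).reverse).length = n - (k + 1) := by simp [pairsR]
      simp only [DRs, dW] at *
      omega
    have hstair1 : stair ((pairsR arr k n).reverse)
        = (hgt arr k, (k : Int)) :: DRs arr n k := by
      rw [pairsR_cons arr k n hk, List.reverse_cons, stair_concat]; rfl
    have htoNat : (((DRs arr n k).length : Int) - 1 + 1).toNat = (DRs arr n k).length := by omega
    have hclo : (List.map (fun i => if k + 1 ≤ i then fclose arr N n i else lclose arr N i)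
        (List.range n)).getD ((k : Int)).toNat 0 = lclose arr N k := by
      simp only [Int.toNat_natCast]
      rw [PySem.List.getD_map_range _ _ _ _ hk]
      simp
    refine ⟨stk.set (DRs arr n k).length (hgt arr k, (k : Int)), ?_, ?_⟩
    · refine Prod.ext ?_ (Prod.ext ?_ (Prod.ext ?_ ?_))
      · -- cnt component
        simp only [Int.toNat_natCast]
        rw [PySem.List.getD_map_range _ _ _ _ hk, map_range_set]
        apply map_range_congr
        intro i hi
        rcases eq_or_ne i k with rfl | hne
        · simp [rcnt]
        · simp only [hne, if_false]
          by_cases hik : k + 1 ≤ i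
          · simp [hik, show k ≤ i by omega]
          · simp [hik, show ¬ (k ≤ i) by omega]
      · -- closest component
        rw [hclo]
        simp only [Int.toNat_natCast]
        rcases hDRe : DRs arr n k with _ | ⟨q, T⟩
        · rw [if_neg (by rintro ⟨h1, -⟩; simp at h1)]
          apply map_range_congr
          intro i hi
          rcases eq_or_ne i k with rfl | hne
          · simp [fclose, hDRe]
          · by_cases hik : k + 1 ≤ i
            · simp [hik, show k ≤ i by omega]
            · simp [hik, show ¬ (k ≤ i) by omega, show ¬ (i = k) from hne]
        · have hget : stk.getD ((((q :: T).length : Int) - 1)).toNat (0, 0) = q := by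
            rw [show (((q :: T).length : Int) - 1).toNat = T.length by simp]
            exact rep_getD_head (hDRe ▸ hrep2)
          rw [hget]
          by_cases hcond2 : |(k : Int) - lclose arr N k| > q.2 - (k : Int)
          · rw [if_pos ⟨by simp only [List.length_cons]; push_cast; omega, hcond2⟩,
              map_range_set]
            apply map_range_congr
            intro i hi
            rcases eq_or_ne i k with rfl | hne
            · simp [fclose, hDRe, hcond2]
            · simp only [hne, if_false]
              by_cases hik : k + 1 ≤ i
              · simp [hik, show k ≤ i by omega]
              · simp [hik, show ¬ (k ≤ i) by omega]
          · rw [if_neg (by rintro ⟨-, h2⟩; exact hcond2 h2)]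
            apply map_range_congr
            intro i hi
            rcases eq_or_ne i k with rfl | hne
            · simp [fclose, hDRe, hcond2]
            · by_cases hik : k + 1 ≤ i
              · simp [hik, show k ≤ i by omega]
              · simp [hik, show ¬ (k ≤ i) by omega, show ¬ (i = k) from hne]
      · -- stack component
        rw [htoNat]
      · -- ptr component
        rw [hstair1]
        simp only [List.length_cons]
        push_cast
        ring
    · rw [hstair1, ← htoNat]
      rw [htoNat]
      exact rep_push hrep2 hDn _

-- B's inner folds are scanF folds over the (height, index) pair lists
lemma scanB_left (arr : List Int) (i : Nat) (s : Int × Int × Int) :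
    ((PySem.List.pyRange 0 (i : Int) 1).reverse).foldl (scanB arr) s
      = ((pairsL arr i).reverse).foldl scanF s := by
  rw [PySem.List.pyRange_zero_nat]
  simp only [pairsL, ← List.map_reverse, List.foldl_map]
  have hfn : ∀ (t : Int × Int × Int) (k : Nat), scanB arr t (k : Int)
      = scanF t (hgt arr k, (k : Int)) := by
    intro t k
    simp [scanB, scanF, hgt]
  exact PySem.List.foldl_congr_mem _ _ _ _ (fun t k _ => hfn t k)

lemma scanB_right (arr : List Int) (n i : Nat) (N : Int) (hN : N = (n : Int)) (s : Int × Int × Int) :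
    (PySem.List.pyRange ((i : Int) + 1) N 1).foldl (scanB arr) s
      = (((pairsR arr (i + 1) n).reverse).reverse).foldl scanF s := by
  rw [List.reverse_reverse, PySem.List.pyRange_one]
  simp only [pairsR, List.range'_eq_map_range, List.map_map, List.foldl_map]
  have hlen : (N - ((i : Int) + 1)).toNat = n - (i + 1) := by omega
  rw [hlen]
  have hfn : ∀ (t : Int × Int × Int) (k : Nat), scanB arr t ((i : Int) + 1 + (k : Int))
      = scanF t ((Function.comp (fun j => (hgt arr j, (j : Int))) (fun x => i + 1 + x)) k) := by
    intro t k
    have h1 : ((i : Int) + 1 + (k : Int)).toNat = i + 1 + k := by omega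
    simp [scanB, scanF, hgt, Function.comp, h1]
  exact PySem.List.foldl_congr_mem _ _ _ _ (fun t k _ => hfn t k)


lemma perIndex (arr : List Int) (n : Nat) (N : Int) (hN : N = (n : Int)) (i : Nat) (hi : i < n) :
    (if lcnt arr i + rcnt arr n i = 0 then "0"
     else PySem.Int.toStr (lcnt arr i + rcnt arr n i) ++ " " ++
          PySem.Int.toStr (fclose arr N n i + 1))
    = (if (((pairsL arr i).reverse).foldl scanF (0, -1, hgt arr i)).1 +
          ((((pairsR arr (i + 1) n).reverse).reverse).foldl scanF (0, -1, hgt arr i)).1 = 0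
       then "0"
       else
         PySem.Int.toStr ((((pairsL arr i).reverse).foldl scanF (0, -1, hgt arr i)).1 +
           ((((pairsR arr (i + 1) n).reverse).reverse).foldl scanF (0, -1, hgt arr i)).1) ++ " " ++
         PySem.Int.toStr
           ((if (((pairsL arr i).reverse).foldl scanF (0, -1, hgt arr i)).2.1 ≥ 0 ∧
                (((((pairsR arr (i + 1) n).reverse).reverse).foldl scanF (0, -1, hgt arr i)).2.1 < 0 ∨
                  (i : Int) - (((pairsL arr i).reverse).foldl scanF (0, -1, hgt arr i)).2.1 ≤
                    ((((pairsR arr (i + 1) n).reverse).reverse).foldl scanF (0, -1, hgt arr i)).2.1 -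
                      (i : Int))
             then (((pairsL arr i).reverse).foldl scanF (0, -1, hgt arr i)).2.1
             else ((((pairsR arr (i + 1) n).reverse).reverse).foldl scanF (0, -1, hgt arr i)).2.1)
            + 1)) := by
  have hPL : ∀ q ∈ pairsL arr i, 0 ≤ q.2 := by
    intro q hq
    simp only [pairsL, List.mem_map, List.mem_range] at hq
    obtain ⟨j, -, rfl⟩ := hq
    simp
  have hPR : ∀ q ∈ (pairsR arr (i + 1) n).reverse, 0 ≤ q.2 := by
    intro q hq
    rw [List.mem_reverse] at hq
    simp only [pairsR, List.mem_map, List.mem_range'_1] at hq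
    obtain ⟨j, -, rfl⟩ := hq
    simp
  rw [scan_spec (pairsL arr i) hPL, scan_spec ((pairsR arr (i + 1) n).reverse) hPR]
  have hDL : dW (hgt arr i) (stair (pairsL arr i)) = DLs arr i := rfl
  have hDR : dW (hgt arr i) (stair ((pairsR arr (i + 1) n).reverse)) = DRs arr n i := rfl
  rw [hDL, hDR]
  simp only [zero_add, show ((-1 : Int) < 0) = True by simp, if_true]
  cases hL : DLs arr i with
  | nil =>
    cases hR : DRs arr n i with
    | nil => simp [lcnt, rcnt, hL, hR]
    | cons r U =>
      have hrmem := DRs_lt_of_mem arr n i r (by rw [hR]; exact List.mem_cons_self)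
      have hc : ¬ (lcnt arr i + rcnt arr n i = 0) := by
        simp [lcnt, rcnt, hL, hR]
        omega
      rw [if_neg hc, if_neg (by simp [lcnt, rcnt, hL, hR] at hc ⊢; omega)]
      have h1 : fclose arr N n i = r.2 := by
        have hlc : lclose arr N i = N := by simp [lclose, hL]
        simp only [fclose, hR, hlc]
        rw [if_pos (by rw [abs_of_nonpos (by omega)]; omega)]
      rw [h1]
      have hcv : lcnt arr i + rcnt arr n i
          = ((([] : List (Int × Int)).length : Int)) + (((r :: U).length : Int)) := by
        simp [lcnt, rcnt, hL, hR]
      rw [← hcv]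
      simp only [List.headD_cons, List.headD_nil]
      rw [if_neg (by rintro ⟨h, -⟩; norm_num at h)]
  | cons q T =>
    have hqmem := DLs_lt_of_mem arr i q (by rw [hL]; exact List.mem_cons_self)
    cases hR : DRs arr n i with
    | nil =>
      have hc : ¬ (lcnt arr i + rcnt arr n i = 0) := by
        simp [lcnt, rcnt, hL, hR]
        omega
      rw [if_neg hc, if_neg (by simp [lcnt, rcnt, hL, hR]; omega)]
      have h1 : fclose arr N n i = q.2 := by
        simp [fclose, hR, lclose, hL]
      rw [h1]
      have hcv : lcnt arr i + rcnt arr n i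
          = (((q :: T).length : Int)) + ((([] : List (Int × Int)).length : Int)) := by
        simp [lcnt, rcnt, hL, hR]
      rw [← hcv]
      simp only [List.headD_cons, List.headD_nil]
      rw [if_pos ⟨hqmem.1, Or.inl (by norm_num)⟩]
    | cons r U =>
      have hrmem := DRs_lt_of_mem arr n i r (by rw [hR]; exact List.mem_cons_self)
      have hc : ¬ (lcnt arr i + rcnt arr n i = 0) := by
        simp [lcnt, rcnt, hL, hR]
        omega
      rw [if_neg hc, if_neg (by simp [lcnt, rcnt, hL, hR]; omega)]
      have hlc : lclose arr N i = q.2 := by simp [lclose, hL]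
      have hcv : lcnt arr i + rcnt arr n i
          = (((q :: T).length : Int)) + (((r :: U).length : Int)) := by
        simp [lcnt, rcnt, hL, hR]
      rw [← hcv]
      simp only [List.headD_cons]
      have hnear : (if q.2 ≥ 0 ∧ (r.2 < 0 ∨ (i : Int) - q.2 ≤ r.2 - (i : Int)) then q.2 else r.2)
          = fclose arr N n i := by
        simp only [fclose, hR, hlc]
        by_cases hcmp : (i : Int) - q.2 ≤ r.2 - (i : Int)
        · rw [if_pos ⟨hqmem.1, Or.inr hcmp⟩, if_neg (by rw [abs_of_nonneg (by omega)]; omega)]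
        · rw [if_neg (by
              rintro ⟨-, h | h⟩
              · omega
              · exact hcmp h),
            if_pos (by rw [abs_of_nonneg (by omega)]; omega)]
      rw [hnear]

-- ===== VERDICT (by name: the statement is the Claim_ definition above) =====
theorem solution_spec : Claim_equal_solution := by
  unfold Claim_equal_solution
  intro N arr _ _
  unfold Spec_solution solution solution_alt
  by_cases hNpos : N ≤ 0
  · rw [PySem.List.pyRange_one_eq_nil hNpos]
    simp
  · push_neg at hNpos
    set n := N.toNat with hn
    have hN : N = (n : Int) := by omega
    obtain ⟨stk1, heq1, hrep1⟩ := leftPass arr n N hN n (le_refl n)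
    have hcnt1 : (List.range n).map (fun i => if i < n then lcnt arr i else 0)
        = (List.range n).map (fun i => lcnt arr i) :=
      map_range_congr _ _ _ (fun i hi => by simp [hi])
    have hclo1 : (List.range n).map (fun i => if i < n then lclose arr N i else N)
        = (List.range n).map (fun i => lclose arr N i) :=
      map_range_congr _ _ _ (fun i hi => by simp [hi])
    rw [hcnt1, hclo1] at heq1
    obtain ⟨stk2, heq2, hrep2⟩ := rightPass arr n N hN stk1 hrep1.1 n 0 (by omega)
    rw [PySem.List.pyRange_neg_one_eq_reverse, show (-1 : Int) + 1 = 0 by ring,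
      show N - 1 + 1 = N by ring]
    rw [show PySem.List.pyRange 0 N 1 = PySem.List.pyRange 0 ((n : Nat) : Int) 1 by rw [← hN]]
    dsimp only
    rw [heq1]
    dsimp only
    rw [show ((0 : Nat) : Int) = (0 : Int) by simp,
      show PySem.List.pyRange 0 N 1 = PySem.List.pyRange 0 ((n : Nat) : Int) 1 by rw [← hN]] at heq2
    rw [heq2]
    dsimp only
    rw [PySem.List.foldl_append_singleton_eq_map, PySem.List.foldl_append_singleton_eq_map]
    simp only [List.nil_append]
    apply List.map_congr_left
    intro j hj
    rw [PySem.List.mem_pyRange_one] at hj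
    have hji : j = ((j.toNat : Nat) : Int) := by omega
    have hi : j.toNat < n := by omega
    rw [hji]
    simp only [Int.toNat_natCast]
    rw [PySem.List.getD_map_range _ _ _ _ hi, PySem.List.getD_map_range _ _ _ _ hi]
    simp only [Nat.zero_le, if_pos, if_true]
    rw [scanB_left arr j.toNat, scanB_right arr n j.toNat N hN]
    exact perIndex arr n N hN j.toNat hi
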